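-- pv_equiv track=rewrite | github.com/ireka6114/kaldi | egs/t04_en_constrained/s5/scripts/score_t04_micro_probes.py | diagnostic_span
-- ===== SOURCE A (Python) =====
-- def diagnostic_span(seq: list[str], probe_type: str) -> tuple[int | None, int | None, int]:
--     if not seq:
--         return None, None, 0
--     if probe_type == "vowel_probe":
--         idx = next((i for i, p in enumerate(seq) if p in {"O_SHORT_I", "O_LONG_I"}), None)
--         if idx is None:
--             return None, None, 0
--         j = idx
--         while j + 1 < len(seq) and seq[j + 1] == seq[idx]:
--             j += 1
--         return idx, j, j - idx + 1
--
--     if probe_type == "pattern_probe":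
--         v_idx = next((i for i, p in enumerate(seq) if p in {"O_SHORT_I", "O_LONG_I"}), None)
--         ih_idx = next((i for i, p in enumerate(seq) if p.startswith("IH_")), None)
--         if v_idx is None or ih_idx is None or ih_idx <= v_idx:
--             return None, None, 0
--         s = v_idx + 1
--         e = ih_idx - 1
--         if e < s:
--             return None, None, 0
--         return s, e, e - s + 1
--
--     return None, None, 0
-- ===== SOURCE B (Python) =====
-- def diagnostic_span(seq: list[str], probe_type: str) -> tuple[int | None, int | None, int]:
--     # single state-machine pass: first vowel index, contiguous run end, first IH_ index
--     v_idx = None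
--     v_val = ""
--     run_end = 0
--     run_open = False
--     ih_idx = None
--     for i, p in enumerate(seq):
--         if v_idx is None and p in ("O_SHORT_I", "O_LONG_I"):
--             v_idx, v_val, run_end, run_open = i, p, i, True
--         elif run_open:
--             if p == v_val:
--                 run_end = i
--             else:
--                 run_open = False
--         if ih_idx is None and p.startswith("IH_"):
--             ih_idx = i
--     if not seq:
--         return None, None, 0
--     if probe_type == "vowel_probe":
--         if v_idx is None:
--             return None, None, 0
--         return v_idx, run_end, run_end - v_idx + 1
--     if probe_type == "pattern_probe":
--         if v_idx is None or ih_idx is None or ih_idx <= v_idx: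
--             return None, None, 0
--         s, e = v_idx + 1, ih_idx - 1
--         if e < s:
--             return None, None, 0
--         return s, e, e - s + 1
--     return None, None, 0
-- ===== Notes on version B (the rewrite author's own statement) =====
-- stated objective: alternative
-- what changed: A makes up to three separate scans (two generator searches plus an index-based while loop extending the vowel run); B does one state-machine pass that simultaneously tracks the first vowel index, the contiguous run end, and the first IH_ index, then branches on probe_type.
import Mathlib
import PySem

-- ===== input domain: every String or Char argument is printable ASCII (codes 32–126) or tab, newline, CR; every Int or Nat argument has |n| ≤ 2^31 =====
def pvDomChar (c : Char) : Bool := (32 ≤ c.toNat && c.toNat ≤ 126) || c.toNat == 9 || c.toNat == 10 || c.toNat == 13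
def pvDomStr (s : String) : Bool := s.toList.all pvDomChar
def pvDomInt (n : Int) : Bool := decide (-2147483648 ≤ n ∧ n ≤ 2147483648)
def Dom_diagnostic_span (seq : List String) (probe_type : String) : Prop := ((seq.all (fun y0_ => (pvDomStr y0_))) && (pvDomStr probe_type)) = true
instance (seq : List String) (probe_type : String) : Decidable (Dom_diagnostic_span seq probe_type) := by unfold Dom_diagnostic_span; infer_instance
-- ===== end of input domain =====

-- B replaces A's up-to-three scans (two generator searches plus a while loop) by one
-- state-machine pass over the sequence; objective: alternative single-pass decomposition.

-- ===== PORT A =====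
-- next((i for i, p in enumerate(seq) if p in {"O_SHORT_I", "O_LONG_I"}), None)
def pvFindVowel : List String → Nat → Option Nat
  | [], _ => none
  | p :: rest, i => if p = "O_SHORT_I" ∨ p = "O_LONG_I" then some i else pvFindVowel rest (i + 1)

-- next((i for i, p in enumerate(seq) if p.startswith("IH_")), None)
def pvFindIH : List String → Nat → Option Nat
  | [], _ => none
  | p :: rest, i => if PySem.Str.startswith p "IH_" then some i else pvFindIH rest (i + 1)

-- while j + 1 < len(seq) and seq[j + 1] == seq[idx]: j += 1   (indices stay in range, getD is exact)
def pvExtend (seq : List String) (idx : Nat) (j : Nat) : Nat :=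
  if j + 1 < seq.length then
    if seq.getD (j + 1) "" = seq.getD idx "" then pvExtend seq idx (j + 1) else j
  else j
termination_by seq.length - j

def diagnostic_span (seq : List String) (probe_type : String) : Option Int × Option Int × Int :=
  if seq = [] then (none, none, 0)
  else if probe_type = "vowel_probe" then
    match pvFindVowel seq 0 with
    | none => (none, none, 0)
    | some idx =>
      let j := pvExtend seq idx idx
      (some (idx : Int), some (j : Int), (j : Int) - (idx : Int) + 1)
  else if probe_type = "pattern_probe" then
    match pvFindVowel seq 0, pvFindIH seq 0 with
    | some v_idx, some ih_idx =>
      if ih_idx ≤ v_idx then (none, none, 0)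
      else
        let s : Int := (v_idx : Int) + 1
        let e : Int := (ih_idx : Int) - 1
        if e < s then (none, none, 0) else (some s, some e, e - s + 1)
    | _, _ => (none, none, 0)
  else (none, none, 0)

-- ===== PORT B =====
-- the single for-loop of Source B: state (v_idx, v_val, run_end, run_open, ih_idx)
def pvScan : List String → Nat → Option Nat → String → Nat → Bool → Option Nat → Option Nat × Nat × Option Nat
  | [], _, vIdx, _, runEnd, _, ihIdx => (vIdx, runEnd, ihIdx)
  | p :: rest, i, vIdx, vVal, runEnd, runOpen, ihIdx =>
    let st :=
      if vIdx = none ∧ (p = "O_SHORT_I" ∨ p = "O_LONG_I") then (some i, p, i, true)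
      else if runOpen then
        if p = vVal then (vIdx, vVal, i, true) else (vIdx, vVal, runEnd, false)
      else (vIdx, vVal, runEnd, runOpen)
    let ihIdx' := if ihIdx = none ∧ PySem.Str.startswith p "IH_" then some i else ihIdx
    pvScan rest (i + 1) st.1 st.2.1 st.2.2.1 st.2.2.2 ihIdx'

def diagnostic_span_alt (seq : List String) (probe_type : String) : Option Int × Option Int × Int :=
  let st := pvScan seq 0 none "" 0 false none
  if seq = [] then (none, none, 0)
  else if probe_type = "vowel_probe" then
    match st.1 with
    | some k => (some (k : Int), some (st.2.1 : Int), (st.2.1 : Int) - (k : Int) + 1)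
    | none => (none, none, 0)
  else if probe_type = "pattern_probe" then
    match st.1 with
    | none => (none, none, 0)
    | some v_idx =>
      match st.2.2 with
      | none => (none, none, 0)
      | some ih_idx =>
        if ih_idx ≤ v_idx then (none, none, 0)
        else
          let s : Int := (v_idx : Int) + 1
          let e : Int := (ih_idx : Int) - 1
          if e < s then (none, none, 0) else (some s, some e, e - s + 1)
  else (none, none, 0)

-- ===== PRECONDITION & SPEC =====
def Spec_diagnostic_span (seq : List String) (probe_type : String) (out : Option Int × Option Int × Int) : Prop := out = diagnostic_span_alt seq probe_type
instance (seq : List String) (probe_type : String) (out : Option Int × Option Int × Int) : Decidable (Spec_diagnostic_span seq probe_type out) := by unfold Spec_diagnostic_span; infer_instance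

-- ===== CLAIM (what is proved, stated in full; the proofs are below) =====
def Claim_equal_diagnostic_span : Prop := ∀ (seq : List String) (probe_type : String), Dom_diagnostic_span seq probe_type → Spec_diagnostic_span seq probe_type (diagnostic_span seq probe_type)

-- ===== LEMMAS AND PROOFS =====

-- the ih component of the scan evolves independently of the run state
theorem pvScan_ih (seq : List String) : ∀ (i : Nat) (vIdx : Option Nat) (vVal : String)
    (runEnd : Nat) (runOpen : Bool) (ihIdx : Option Nat),
    (pvScan seq i vIdx vVal runEnd runOpen ihIdx).2.2 =
      (match ihIdx with | some k => some k | none => pvFindIH seq i) := by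
  induction seq with
  | nil => intro i vIdx vVal runEnd runOpen ihIdx; cases ihIdx <;> simp [pvScan, pvFindIH]
  | cons p rest ih =>
    intro i vIdx vVal runEnd runOpen ihIdx
    simp only [pvScan]
    cases ihIdx with
    | some k => simp [ih]
    | none =>
      simp only [ih, pvFindIH]
      split_ifs with h1 h2 h3 <;> simp_all

-- the v_idx component is the first vowel index
theorem pvScan_vidx (seq : List String) : ∀ (i : Nat) (vIdx : Option Nat) (vVal : String)
    (runEnd : Nat) (runOpen : Bool) (ihIdx : Option Nat),
    (pvScan seq i vIdx vVal runEnd runOpen ihIdx).1 =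
      (match vIdx with | some k => some k | none => pvFindVowel seq i) := by
  induction seq with
  | nil => intro i vIdx vVal runEnd runOpen ihIdx; cases vIdx <;> simp [pvScan, pvFindVowel]
  | cons p rest ih =>
    intro i vIdx vVal runEnd runOpen ihIdx
    simp only [pvScan]
    cases vIdx with
    | some k =>
      by_cases ho : runOpen <;> by_cases hv : p = vVal <;> simp [ho, hv, ih]
    | none =>
      by_cases hw : p = "O_SHORT_I" ∨ p = "O_LONG_I"
      · simp [hw, pvFindVowel, ih]
      · have hg : ¬ ((none : Option Nat) = none ∧ (p = "O_SHORT_I" ∨ p = "O_LONG_I")) := by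
          simp [hw]
        rw [if_neg hg]
        split_ifs <;> simp [ih, pvFindVowel, hw]

-- once the run is closed (and v_idx set) run_end never changes
theorem pvScan_closed (seq : List String) : ∀ (i : Nat) (k : Nat) (vVal : String)
    (runEnd : Nat) (ihIdx : Option Nat),
    (pvScan seq i (some k) vVal runEnd false ihIdx).2.1 = runEnd := by
  induction seq with
  | nil => intro i k vVal runEnd ihIdx; simp [pvScan]
  | cons p rest ih => intro i k vVal runEnd ihIdx; simp [pvScan, ih]

-- an open run at run_end = i-1 extends by the equal prefix of the remainder
theorem pvScan_open (seq : List String) : ∀ (r : Nat) (k : Nat) (v : String) (ihIdx : Option Nat),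
    (pvScan seq (r + 1) (some k) v r true ihIdx).2.1 =
      r + (seq.takeWhile (fun x => x = v)).length := by
  induction seq with
  | nil => intro r k v ihIdx; simp [pvScan]
  | cons p rest ih =>
    intro r k v ihIdx
    simp only [pvScan]
    by_cases hv : p = v
    · simp [hv, List.takeWhile, ih]
      omega
    · simp [hv, List.takeWhile, pvScan_closed]

-- what run_end ends up being when started in the searching state
def pvRun : List String → Nat → Nat
  | [], _ => 0
  | p :: rest, i =>
    if p = "O_SHORT_I" ∨ p = "O_LONG_I" then i + (rest.takeWhile (fun x => x = p)).length
    else pvRun rest (i + 1)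

theorem pvScan_run (seq : List String) : ∀ (i : Nat) (vVal : String) (ihIdx : Option Nat),
    (pvScan seq i none vVal 0 false ihIdx).2.1 = pvRun seq i := by
  induction seq with
  | nil => intro i vVal ihIdx; simp [pvScan, pvRun]
  | cons p rest ih =>
    intro i vVal ihIdx
    simp only [pvScan, pvRun]
    by_cases hw : p = "O_SHORT_I" ∨ p = "O_LONG_I"
    · simp [hw, pvScan_open]
    · simp [hw, ih]

-- A's while loop computed as a takeWhile length on the tail
theorem pvExtend_eq (seq : List String) (idx : Nat) : ∀ (j : Nat),
    pvExtend seq idx j = j + ((seq.drop (j + 1)).takeWhile (fun x => x = seq.getD idx "")).length := by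
  intro j
  induction h : seq.length - j using Nat.strong_induction_on generalizing j with
  | _ n IH =>
    rw [pvExtend]
    by_cases hlt : j + 1 < seq.length
    · rw [if_pos hlt]
      have hdrop : seq.drop (j + 1) = seq.getD (j + 1) "" :: seq.drop (j + 1 + 1) := by
        rw [List.getD_eq_getElem?_getD, List.getElem?_eq_getElem hlt, Option.getD_some]
        exact List.drop_eq_getElem_cons hlt
      rw [hdrop, List.takeWhile_cons]
      by_cases he : seq.getD (j + 1) "" = seq.getD idx ""
      · rw [if_pos he, IH (seq.length - (j + 1)) (by omega) (j + 1) rfl,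
          if_pos (by simpa using he), List.length_cons]
        omega
      · rw [if_neg he, if_neg (by simpa using he)]
        simp
    · rw [if_neg hlt]
      have hnil : seq.drop (j + 1) = [] := List.drop_eq_nil_of_le (by omega)
      rw [hnil]
      simp

-- linking pvRun to A's find + extend
theorem pvRun_link (seq : List String) : ∀ (i : Nat),
    (pvFindVowel seq i = none → True) ∧
    (∀ k, pvFindVowel seq i = some k → i ≤ k ∧
      pvRun seq i = k + ((seq.drop (k - i + 1)).takeWhile (fun x => x = seq.getD (k - i) "")).length) := by
  induction seq with
  | nil => intro i; exact ⟨fun _ => trivial, by intro k h; simp [pvFindVowel] at h⟩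
  | cons p rest ih =>
    intro i
    refine ⟨fun _ => trivial, ?_⟩
    intro k hk
    by_cases hw : p = "O_SHORT_I" ∨ p = "O_LONG_I"
    · simp [pvFindVowel, hw] at hk
      subst hk
      simp [pvRun, hw]
    · simp [pvFindVowel, hw] at hk
      obtain ⟨hle, hrun⟩ := (ih (i + 1)).2 k hk
      refine ⟨by omega, ?_⟩
      have h1 : k - i ≥ 1 := by omega
      have h2 : (p :: rest).drop (k - i + 1) = rest.drop (k - (i + 1) + 1) := by
        have : k - i + 1 = (k - (i + 1) + 1) + 1 := by omega
        rw [this]; simp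
      have h3 : (p :: rest).getD (k - i) "" = rest.getD (k - (i + 1)) "" := by
        have : k - i = (k - (i + 1)) + 1 := by omega
        rw [this]; simp
      rw [h2, h3]
      simpa [pvRun, hw] using hrun

-- ===== VERDICT (by name: the statement is the Claim_ definition above) =====
theorem diagnostic_span_spec : Claim_equal_diagnostic_span := by
  intro seq probe_type _
  unfold Spec_diagnostic_span diagnostic_span diagnostic_span_alt
  by_cases hnil : seq = []
  · simp [hnil]
  · simp only [hnil, if_false]
    by_cases hv : probe_type = "vowel_probe"
    · simp only [hv, if_true]
      rw [pvScan_vidx]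
      cases hfind : pvFindVowel seq 0 with
      | none => simp
      | some k =>
        obtain ⟨_, hrun⟩ := (pvRun_link seq 0).2 k hfind
        simp only
        rw [pvScan_run, hrun, pvExtend_eq]
        simp
    · by_cases hp : probe_type = "pattern_probe"
      · rw [if_neg hv, if_neg hv, if_pos hp, if_pos hp, pvScan_vidx, pvScan_ih]
        cases pvFindVowel seq 0 <;> cases pvFindIH seq 0 <;> rfl
      · simp [hv, hp]
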